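-- pv_equiv track=rewrite | github.com/hebiabobo/GenAug | code/augmentation_methods/test3.py | greenness_on_other_side
-- ===== SOURCE A (Python) =====
-- def greenness_on_other_side(greenness):
--     n = len(greenness)
--     left_max = [0] * n
--     right_max = [0] * n
--     left_max[0] = greenness[0]
--     right_max[n-1] = greenness[n-1]
--
--     for i in range(1, n):
--         left_max[i] = max(left_max[i-1], greenness[i])
--         right_max[n-1-i] = max(right_max[n-i], greenness[n-1-i])
--
--     greenness_other_side = []
--     for i in range(n):
--         if i == 0:
--             greenness_other_side.append(right_max[i+1])
--         elif i == n-1: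
--             greenness_other_side.append(left_max[i-1])
--         else:
--             greenness_other_side.append(max(left_max[i-1], right_max[i+1]))
--
--     return greenness_other_side
-- ===== SOURCE B (Python) =====
-- def greenness_on_other_side(greenness):
--     s = sorted(greenness)
--     mx = s[-1]
--     cnt = greenness.count(mx)
--     out = []
--     for g in greenness:
--         if g == mx and cnt == 1:
--             out.append(s[-2])
--         else:
--             out.append(mx)
--     return out
-- ===== Notes on version B (the rewrite author's own statement) =====
-- stated objective: alternative
-- what changed: Replaces A's prefix-max/suffix-max array construction with a single sort: take the global maximum and second-largest element from sorted(greenness) and count the maximum once, then classify each position (the position of a unique maximum gets the second-largest value, every other position gets the maximum).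
import Mathlib
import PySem

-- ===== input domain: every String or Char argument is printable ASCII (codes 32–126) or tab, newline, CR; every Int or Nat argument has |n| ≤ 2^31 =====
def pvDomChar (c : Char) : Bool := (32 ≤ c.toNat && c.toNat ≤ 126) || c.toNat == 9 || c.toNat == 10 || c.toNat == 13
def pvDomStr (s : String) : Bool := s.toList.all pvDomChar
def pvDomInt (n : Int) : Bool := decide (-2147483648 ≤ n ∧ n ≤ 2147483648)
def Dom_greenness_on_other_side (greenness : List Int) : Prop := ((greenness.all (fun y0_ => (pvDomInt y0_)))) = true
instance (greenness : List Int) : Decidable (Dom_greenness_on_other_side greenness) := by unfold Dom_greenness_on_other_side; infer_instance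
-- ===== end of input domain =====

-- B replaces A's prefix/suffix running-max arrays by one sort: global max + second-largest
-- from sorted(greenness), then per-position classification (objective: alternative algorithm).

-- ===== PORT A =====
def greenness_on_other_side (greenness : List Int) : List Int :=
  let n : Int := greenness.length
  let left_max : List Int := List.replicate greenness.length 0
  let right_max : List Int := List.replicate greenness.length 0
  let left_max := PySem.List.pySetD left_max 0 (PySem.List.pyGetD greenness 0 0)
  let right_max := PySem.List.pySetD right_max (n - 1) (PySem.List.pyGetD greenness (n - 1) 0)
  let st := (PySem.List.pyRange 1 n 1).foldl (fun (st : List Int × List Int) i =>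
      (PySem.List.pySetD st.1 i
         (max (PySem.List.pyGetD st.1 (i - 1) 0) (PySem.List.pyGetD greenness i 0)),
       PySem.List.pySetD st.2 (n - 1 - i)
         (max (PySem.List.pyGetD st.2 (n - i) 0) (PySem.List.pyGetD greenness (n - 1 - i) 0))))
    (left_max, right_max)
  (PySem.List.pyRange 0 n 1).foldl (fun acc i =>
      if i = 0 then acc ++ [PySem.List.pyGetD st.2 (i + 1) 0]
      else if i = n - 1 then acc ++ [PySem.List.pyGetD st.1 (i - 1) 0]
      else acc ++ [max (PySem.List.pyGetD st.1 (i - 1) 0) (PySem.List.pyGetD st.2 (i + 1) 0)]) []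

-- ===== PORT B =====
def greenness_on_other_side_alt (greenness : List Int) : List Int :=
  let s := PySem.List.sorted greenness (fun x => x) false
  let mx := PySem.List.pyGetD s (-1) 0
  let cnt := PySem.List.count greenness mx
  greenness.foldl (fun out g =>
    if g = mx ∧ cnt = 1 then out ++ [PySem.List.pyGetD s (-2) 0]
    else out ++ [mx]) []

-- ===== PRECONDITION & SPEC =====
-- A raises IndexError on lists of length 0 or 1 (greenness[0] resp. right_max[1]); B raises there too (s[-1] resp. s[-2]).
def Pre_greenness_on_other_side (greenness : List Int) : Prop := 2 ≤ greenness.length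
instance (greenness : List Int) : Decidable (Pre_greenness_on_other_side greenness) := by
  unfold Pre_greenness_on_other_side; infer_instance
def pvWitness_greenness_on_other_side : List Int := [3, 1, 2]

def Spec_greenness_on_other_side (greenness : List Int) (out : List Int) : Prop := out = greenness_on_other_side_alt greenness
instance (greenness : List Int) (out : List Int) : Decidable (Spec_greenness_on_other_side greenness out) := by unfold Spec_greenness_on_other_side; infer_instance

-- ===== CLAIM (what is proved, stated in full; the proofs are below) =====
def Claim_equal_greenness_on_other_side : Prop := ∀ (greenness : List Int), Dom_greenness_on_other_side greenness → Pre_greenness_on_other_side greenness → Spec_greenness_on_other_side greenness (greenness_on_other_side greenness)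

-- ===== LEMMAS AND PROOFS =====

-- ===== LEMMAS AND PROOFS =====

-- maximum with a default (proof-side only)
noncomputable def pvMax (l : List Int) : Int := l.maximum.unbotD 0

theorem pvMax_coe {l : List Int} (h : l ≠ []) : l.maximum = (pvMax l : WithBot Int) := by
  cases hm : l.maximum with
  | bot => exact absurd (List.maximum_eq_bot.mp hm) h
  | coe m => simp [pvMax, hm]

theorem pvMax_mem {l : List Int} (h : l ≠ []) : pvMax l ∈ l :=
  List.maximum_mem (pvMax_coe h)

theorem le_pvMax {l : List Int} (h : l ≠ []) {a : Int} (ha : a ∈ l) : a ≤ pvMax l :=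
  List.le_maximum_of_mem ha (pvMax_coe h)

theorem pvMax_eq_of {l : List Int} {m : Int} (hm : m ∈ l) (hb : ∀ a ∈ l, a ≤ m) :
    pvMax l = m := by
  have h : l ≠ [] := List.ne_nil_of_mem hm
  have h2 := List.maximum_eq_coe_iff.mpr ⟨hm, hb⟩
  rw [pvMax_coe h] at h2
  exact_mod_cast h2

theorem pvMax_perm {l l' : List Int} (h : l.Perm l') : pvMax l = pvMax l' := by
  simp [pvMax, h.maximum_eq]

theorem pvMax_concat {l : List Int} (h : l ≠ []) (a : Int) :
    pvMax (l ++ [a]) = max (pvMax l) a := by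
  have h2 : (l ++ [a]).maximum = ((max (pvMax l) a : Int) : WithBot Int) := by
    rw [List.maximum_concat, pvMax_coe h]
    exact_mod_cast rfl
  have h3 : l ++ [a] ≠ [] := by simp
  rw [pvMax_coe h3] at h2
  exact_mod_cast h2

theorem pvMax_cons {l : List Int} (h : l ≠ []) (a : Int) :
    pvMax (a :: l) = max a (pvMax l) := by
  have h2 : (a :: l).maximum = ((max a (pvMax l) : Int) : WithBot Int) := by
    rw [List.maximum_cons, pvMax_coe h]
    exact_mod_cast rfl
  have h3 : a :: l ≠ [] := by simp
  rw [pvMax_coe h3] at h2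
  exact_mod_cast h2

theorem pvMax_append {l₁ l₂ : List Int} (h₁ : l₁ ≠ []) (h₂ : l₂ ≠ []) :
    pvMax (l₁ ++ l₂) = max (pvMax l₁) (pvMax l₂) := by
  have h2 : (l₁ ++ l₂).maximum = ((max (pvMax l₁) (pvMax l₂) : Int) : WithBot Int) := by
    rw [List.maximum_append, pvMax_coe h₁, pvMax_coe h₂]
    exact_mod_cast rfl
  have h3 : l₁ ++ l₂ ≠ [] := by simp [h₁]
  rw [pvMax_coe h3] at h2
  exact_mod_cast h2

theorem pvMax_pairwise_getLast {l : List Int} (h : l ≠ []) (hp : l.Pairwise (· ≤ ·)) :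
    pvMax l = l.getLast h := by
  apply pvMax_eq_of (List.getLast_mem h)
  intro a ha
  rcases (List.mem_iff_getElem).mp ha with ⟨i, hi, rfl⟩
  rw [List.getLast_eq_getElem]
  rcases Nat.lt_or_ge i (l.length - 1) with hlt | hge
  · exact List.pairwise_iff_getElem.mp hp i (l.length - 1) hi (by omega) hlt
  · have : i = l.length - 1 := by omega
    subst this; exact le_refl _

-- prefix / suffix maxima
noncomputable def pvPm (g : List Int) (j : Nat) : Int := pvMax (g.take (j + 1))
noncomputable def pvSm (g : List Int) (j : Nat) : Int := pvMax (g.drop j)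


theorem pvMax_singleton (a : Int) : pvMax [a] = a := by
  simp [pvMax, List.maximum_singleton]

theorem take_one_eq (g : List Int) (h : 0 < g.length) : g.take 1 = [g[0]] := by
  cases g with
  | nil => simp at h
  | cons x t => simp

theorem drop_last_eq (g : List Int) (h : 0 < g.length) :
    g.drop (g.length - 1) = [g[g.length - 1]] := by
  apply List.ext_getElem
  · simp; omega
  · intro i h1 h2
    simp only [List.getElem_drop]
    simp only [List.length_drop] at h1
    have : i = 0 := by omega
    subst this
    simp

theorem pvPm_zero (g : List Int) (h : 0 < g.length) : pvPm g 0 = g[0] := by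
  unfold pvPm
  rw [take_one_eq g h, pvMax_singleton]

theorem pvSm_last (g : List Int) (h : 0 < g.length) : pvSm g (g.length - 1) = g[g.length - 1] := by
  unfold pvSm
  rw [drop_last_eq g h, pvMax_singleton]

theorem pvPm_succ (g : List Int) (k : Nat) (hk1 : 1 ≤ k) (hk : k < g.length) :
    pvPm g k = max (pvPm g (k - 1)) g[k] := by
  unfold pvPm
  have h1 : g.take (k + 1) = g.take k ++ [g[k]] := by
    rw [List.take_add_one, List.getElem?_eq_getElem hk]; rfl
  have h2 : g.take k ≠ [] := by
    apply List.ne_nil_of_length_pos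
    rw [List.length_take]
    omega
  have e : k - 1 + 1 = k := by omega
  rw [h1, pvMax_concat h2, e]

theorem pvSm_step (g : List Int) (k : Nat) (hk1 : 1 ≤ k) (hk : k + 1 ≤ g.length) :
    pvSm g (g.length - 1 - k) = max (pvSm g (g.length - k)) g[g.length - 1 - k] := by
  unfold pvSm
  have e : g.length - 1 - k + 1 = g.length - k := by omega
  have h1 : g.drop (g.length - 1 - k) = g[g.length - 1 - k] :: g.drop (g.length - k) := by
    rw [List.drop_eq_getElem_cons (by omega), e]
  have h2 : g.drop (g.length - k) ≠ [] := by
    apply List.ne_nil_of_length_pos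
    rw [List.length_drop]
    omega
  rw [h1, pvMax_cons h2, max_comm]

-- the pieces of port A, named so the invariant can speak about them
def pvBody (g : List Int) : List Int × List Int → Int → List Int × List Int := fun st i =>
  (PySem.List.pySetD st.1 i
     (max (PySem.List.pyGetD st.1 (i - 1) 0) (PySem.List.pyGetD g i 0)),
   PySem.List.pySetD st.2 ((g.length : Int) - 1 - i)
     (max (PySem.List.pyGetD st.2 ((g.length : Int) - i) 0)
          (PySem.List.pyGetD g ((g.length : Int) - 1 - i) 0)))

def pvInit (g : List Int) : List Int × List Int :=
  (PySem.List.pySetD (List.replicate g.length (0 : Int)) 0 (PySem.List.pyGetD g 0 0),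
   PySem.List.pySetD (List.replicate g.length (0 : Int)) ((g.length : Int) - 1)
     (PySem.List.pyGetD g ((g.length : Int) - 1) 0))

def pvArrs (g : List Int) : List Int × List Int :=
  (PySem.List.pyRange 1 (g.length : Int) 1).foldl (pvBody g) (pvInit g)

theorem portA_eq (g : List Int) :
    greenness_on_other_side g =
      (PySem.List.pyRange 0 (g.length : Int) 1).foldl (fun acc i =>
        if i = 0 then acc ++ [PySem.List.pyGetD (pvArrs g).2 (i + 1) 0]
        else if i = (g.length : Int) - 1 then acc ++ [PySem.List.pyGetD (pvArrs g).1 (i - 1) 0]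
        else acc ++ [max (PySem.List.pyGetD (pvArrs g).1 (i - 1) 0)
                         (PySem.List.pyGetD (pvArrs g).2 (i + 1) 0)]) [] := rfl

theorem set_map_range (f : Nat → Int) (n j : Nat) (v : Int) (_hj : j < n) :
    ((List.range n).map f).set j v = (List.range n).map (fun i => if i = j then v else f i) := by
  apply List.ext_getElem
  · simp
  · intro i h1 h2
    simp only [List.length_set, List.length_map, List.length_range] at h1
    rw [List.getElem_set]
    simp only [List.getElem_map, List.getElem_range]
    split_ifs with h3 h4 h4
    · rfl
    · exact absurd h3.symm h4
    · exact absurd h4.symm h3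
    · rfl

theorem arrs_inv (g : List Int) (hn : 2 ≤ g.length) :
    ∀ k : Nat, 1 ≤ k → k ≤ g.length →
    (PySem.List.pyRange 1 (k : Int) 1).foldl (pvBody g) (pvInit g) =
      ((List.range g.length).map (fun j => if j < k then pvPm g j else 0),
       (List.range g.length).map (fun j => if g.length - k ≤ j then pvSm g j else 0)) := by
  intro k hk1
  induction k, hk1 using Nat.le_induction with
  | base =>
    intro _
    rw [show ((1 : Nat) : Int) = 1 by norm_num, PySem.List.pyRange_one_eq_nil (by omega)]
    simp only [List.foldl_nil]
    unfold pvInit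
    have e1 : ((g.length : Int) - 1) = ((g.length - 1 : Nat) : Int) := by omega
    rw [e1]
    simp only [PySem.List.pySetD_natCast, PySem.List.pyGetD_natCast,
      List.getD_eq_getElem _ _ (by omega : g.length - 1 < g.length)]
    have hr : List.replicate g.length (0 : Int) = (List.range g.length).map (fun _ => 0) := by
      simp [List.map_const']
    rw [hr, PySem.List.pySetD_of_nonneg _ _ (by norm_num), PySem.List.pyGetD_zero,
      List.getD_eq_getElem _ _ (by omega : 0 < g.length),
      show ((0 : Int)).toNat = 0 from rfl,
      set_map_range _ _ 0 _ (by omega), set_map_range _ _ (g.length - 1) _ (by omega)]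
    refine Prod.ext ?_ ?_ <;> simp only [] <;> apply List.map_congr_left <;> intro j hj <;>
      rw [List.mem_range] at hj
    · by_cases h0 : j = 0
      · subst h0; simp [pvPm_zero g (by omega)]
      · simp only [if_neg h0, if_neg (by omega : ¬ j < 1)]
    · by_cases h0 : j = g.length - 1
      · subst h0; simp [pvSm_last g (by omega)]
      · simp only [if_neg h0, if_neg (by omega : ¬ g.length - 1 ≤ j)]
  | succ k hk ih =>
    intro hk1
    have hih := ih (by omega)
    rw [show ((k + 1 : Nat) : Int) = (k : Int) + 1 by push_cast; ring,
      PySem.List.pyRange_one_succ_right (by omega), List.foldl_append, hih]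
    simp only [List.foldl_cons, List.foldl_nil]
    unfold pvBody
    simp only []
    have e1 : ((k : Int) - 1) = ((k - 1 : Nat) : Int) := by omega
    have e2 : ((g.length : Int) - 1 - (k : Int)) = ((g.length - 1 - k : Nat) : Int) := by omega
    have e3 : ((g.length : Int) - (k : Int)) = ((g.length - k : Nat) : Int) := by omega
    rw [e1, e2, e3]
    simp only [PySem.List.pySetD_natCast, PySem.List.pyGetD_natCast]
    rw [PySem.List.getD_map_range _ _ _ _ (by omega : k - 1 < g.length),
      PySem.List.getD_map_range _ _ _ _ (by omega : g.length - k < g.length),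
      set_map_range _ _ k _ (by omega), set_map_range _ _ (g.length - 1 - k) _ (by omega),
      List.getD_eq_getElem _ _ (by omega : k < g.length),
      List.getD_eq_getElem _ _ (by omega : g.length - 1 - k < g.length)]
    rw [if_pos (by omega : k - 1 < k), if_pos (by omega : g.length - k ≤ g.length - k)]
    refine Prod.ext ?_ ?_ <;> simp only [] <;> apply List.map_congr_left <;> intro j hj <;>
      rw [List.mem_range] at hj
    · by_cases h0 : j = k
      · rw [if_pos h0, if_pos (by omega : j < k + 1), h0, pvPm_succ g k (by omega) (by omega)]
      · rw [if_neg h0]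
        by_cases h1 : j < k
        · rw [if_pos h1, if_pos (by omega : j < k + 1)]
        · rw [if_neg h1, if_neg (by omega : ¬ j < k + 1)]
    · by_cases h0 : j = g.length - 1 - k
      · rw [if_pos h0, if_pos (by omega : g.length - (k + 1) ≤ j), h0,
          pvSm_step g k (by omega) (by omega)]
      · rw [if_neg h0]
        by_cases h1 : g.length - k ≤ j
        · rw [if_pos h1, if_pos (by omega : g.length - (k + 1) ≤ j)]
        · rw [if_neg h1, if_neg (by omega : ¬ g.length - (k + 1) ≤ j)]

theorem pvArrs_eq (g : List Int) (hn : 2 ≤ g.length) :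
    pvArrs g = ((List.range g.length).map (pvPm g), (List.range g.length).map (pvSm g)) := by
  have h := arrs_inv g hn g.length (by omega) (le_refl _)
  unfold pvArrs
  rw [h]
  refine Prod.ext ?_ ?_ <;> simp only []
  · apply List.map_congr_left; intro j hj; rw [List.mem_range] at hj; simp [hj]
  · apply List.map_congr_left; intro j _; simp

-- B's three precomputed values, named
def pvS (g : List Int) : List Int := PySem.List.sorted g (fun x => x) false
def pvMx (g : List Int) : Int := PySem.List.pyGetD (pvS g) (-1) 0
def pvM2 (g : List Int) : Int := PySem.List.pyGetD (pvS g) (-2) 0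

theorem pvS_ne_nil (g : List Int) (h : g ≠ []) : pvS g ≠ [] := by
  intro hc
  unfold pvS at hc
  have h2 := congrArg List.length hc
  rw [PySem.List.length_sorted] at h2
  simp at h2
  exact h h2

theorem sorted_getLast (g : List Int) (_h : g ≠ []) (hs : pvS g ≠ []) :
    (pvS g).getLast hs = pvMax g := by
  have hp : (pvS g).Pairwise (· ≤ ·) := PySem.List.sorted_pairwise g (fun x => x)
  rw [← pvMax_pairwise_getLast hs hp]
  exact pvMax_perm (PySem.List.sorted_perm g (fun x => x) false)

theorem pvMx_eq (g : List Int) (h : g ≠ []) : pvMx g = pvMax g := by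
  have hs := pvS_ne_nil g h
  unfold pvMx
  rw [PySem.List.pyGetD_neg_one _ _ hs]
  exact sorted_getLast g h hs

theorem pvM2_eq (g : List Int) (hn : 2 ≤ g.length) : pvM2 g = pvMax (pvS g).dropLast := by
  have hl : (pvS g).length = g.length := PySem.List.length_sorted g (fun x => x) false
  have hs2 : 2 ≤ (pvS g).length := by omega
  unfold pvM2
  rw [PySem.List.pyGetD_neg_ofNat _ 2 0 (by omega) hs2]
  have hd : (pvS g).dropLast ≠ [] := by
    apply List.ne_nil_of_length_pos
    rw [List.length_dropLast]; omega
  have hp : (pvS g).dropLast.Pairwise (· ≤ ·) :=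
    List.Pairwise.sublist (List.dropLast_sublist _) (PySem.List.sorted_pairwise g (fun x => x))
  rw [pvMax_pairwise_getLast hd hp, List.getLast_eq_getElem, List.getElem_dropLast]
  have e : (pvS g).dropLast.length - 1 = (pvS g).length - 2 := by
    rw [List.length_dropLast]; omega
  simp only [e]

theorem portB_eq (g : List Int) :
    greenness_on_other_side_alt g =
      g.map (fun x => if x = pvMx g ∧ PySem.List.count g (pvMx g) = 1 then pvM2 g else pvMx g) := by
  show g.foldl (fun out x => if x = pvMx g ∧ PySem.List.count g (pvMx g) = 1
      then out ++ [PySem.List.pyGetD (pvS g) (-2) 0] else out ++ [pvMx g]) [] = _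
  have hF : (fun (out : List Int) x => if x = pvMx g ∧ PySem.List.count g (pvMx g) = 1
      then out ++ [PySem.List.pyGetD (pvS g) (-2) 0] else out ++ [pvMx g])
      = fun out x => out ++ [if x = pvMx g ∧ PySem.List.count g (pvMx g) = 1
          then pvM2 g else pvMx g] := by
    funext out x
    split_ifs <;> rfl
  rw [hF, PySem.List.foldl_append_singleton_eq_map, List.nil_append]

-- the "max of everything except position k"
theorem others_max (g : List Int) (hn : 2 ≤ g.length) (k : Nat) (hk : k < g.length) :
    pvMax (g.take k ++ g.drop (k + 1)) =
      if g[k] = pvMax g ∧ List.count (pvMax g) g = 1 then pvMax (pvS g).dropLast else pvMax g := by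
  have hg : g ≠ [] := by intro hc; subst hc; simp at hn
  have hsplit : g = g.take k ++ g[k] :: g.drop (k + 1) := by
    conv_lhs => rw [← List.take_append_drop k g]
    congr 1
    exact List.drop_eq_getElem_cons hk
  have hu : g.take k ++ g.drop (k + 1) ≠ [] := by
    apply List.ne_nil_of_length_pos
    rw [List.length_append, List.length_take, List.length_drop]
    omega
  have h2 : (g[k] :: (g.take k ++ g.drop (k + 1))).Perm g := by
    conv_rhs => rw [hsplit]
    exact List.perm_middle.symm
  have hperm : ((g.take k ++ g.drop (k + 1)) ++ [g[k]]).Perm g :=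
    (List.perm_append_singleton _ _).trans h2
  split_ifs with hcond
  · -- unique maximum at position k
    obtain ⟨hval, _⟩ := hcond
    have hs := pvS_ne_nil g hg
    have hsd : pvS g = (pvS g).dropLast ++ [pvMax g] := by
      conv_lhs => rw [← List.dropLast_append_getLast hs]
      rw [sorted_getLast g hg hs]
    have hp2 : ((g.take k ++ g.drop (k + 1)) ++ [pvMax g]).Perm
        ((pvS g).dropLast ++ [pvMax g]) := by
      rw [← hsd, ← hval]
      exact hperm.trans (PySem.List.sorted_perm g (fun x => x) false).symm
    have hp3 : (g.take k ++ g.drop (k + 1)).Perm (pvS g).dropLast := by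
      have := ((List.perm_append_singleton _ _).symm.trans hp2).trans
        (List.perm_append_singleton _ _)
      exact this.cons_inv
    exact pvMax_perm hp3
  · -- the maximum survives removal of position k
    set M := pvMax g with hM
    apply pvMax_eq_of
    · -- M is a member of the remainder
      have hm : M ∈ g := pvMax_mem hg
      rcases Decidable.em (g[k] = M) with hval | hval
      · -- then the count is not 1, so another copy exists
        have hcnt : List.count M g ≠ 1 := fun hc => hcond ⟨hval, hc⟩
        have h1 : 0 < List.count M g := List.count_pos_iff.mpr hm
        have he : List.count M g = List.count M (g.take k ++ g[k] :: g.drop (k + 1)) := by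
          rw [← hsplit]
        rw [List.count_append, List.count_cons] at he
        have : 0 < List.count M (g.take k) + List.count M (g.drop (k + 1)) := by
          simp [hval] at he
          omega
        rcases Nat.lt_or_ge 0 (List.count M (g.take k)) with hpos | hzero
        · exact List.mem_append_left _ (List.count_pos_iff.mp hpos)
        · exact List.mem_append_right _ (List.count_pos_iff.mp (by omega))
      · -- the maximum sits elsewhere
        have hm2 : M ∈ g.take k ++ g[k] :: g.drop (k + 1) := by rw [← hsplit]; exact hm
        rcases List.mem_append.mp hm2 with h1 | h1
        · exact List.mem_append_left _ h1
        · rcases List.mem_cons.mp h1 with h2 | h2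
          · exact absurd h2.symm hval
          · exact List.mem_append_right _ h2
    · intro a ha
      apply le_pvMax hg
      rcases List.mem_append.mp ha with h1 | h1
      · exact List.mem_of_mem_take h1
      · exact List.mem_of_mem_drop h1

theorem pvArrs_fst (g : List Int) (hn : 2 ≤ g.length) :
    (pvArrs g).1 = (List.range g.length).map (pvPm g) := by rw [pvArrs_eq g hn]

theorem pvArrs_snd (g : List Int) (hn : 2 ≤ g.length) :
    (pvArrs g).2 = (List.range g.length).map (pvSm g) := by rw [pvArrs_eq g hn]

noncomputable def pvOutf (g : List Int) (i : Int) : Int :=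
  if i = 0 then PySem.List.pyGetD (pvArrs g).2 (i + 1) 0
  else if i = (g.length : Int) - 1 then PySem.List.pyGetD (pvArrs g).1 (i - 1) 0
  else max (PySem.List.pyGetD (pvArrs g).1 (i - 1) 0) (PySem.List.pyGetD (pvArrs g).2 (i + 1) 0)

theorem pvPointwise (g : List Int) (hn : 2 ≤ g.length) (k : Nat) (h1 : k < g.length) :
    pvOutf g ((k : Nat) : Int) =
      if g[k] = pvMx g ∧ PySem.List.count g (pvMx g) = 1 then pvM2 g else pvMx g := by
  have hg : g ≠ [] := by intro hc; subst hc; simp at hn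
  rw [pvMx_eq g hg, pvM2_eq g hn, PySem.List.count_eq, ← others_max g hn k h1]
  unfold pvOutf
  rw [pvArrs_fst g hn, pvArrs_snd g hn]
  by_cases hk0 : k = 0
  · subst hk0
    rw [if_pos (by norm_num)]
    rw [show ((0 : Nat) : Int) + 1 = ((1 : Nat) : Int) by norm_num, PySem.List.pyGetD_natCast,
      PySem.List.getD_map_range _ _ _ _ (by omega : 1 < g.length)]
    simp [pvSm]
  · by_cases hkl : k = g.length - 1
    · rw [if_neg (by omega), if_pos (by omega)]
      rw [show ((k : Nat) : Int) - 1 = ((k - 1 : Nat) : Int) by omega, PySem.List.pyGetD_natCast,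
        PySem.List.getD_map_range _ _ _ _ (by omega : k - 1 < g.length)]
      have hd : g.drop (k + 1) = [] := List.drop_eq_nil_of_le (by omega)
      rw [hd, List.append_nil]
      show pvMax (g.take (k - 1 + 1)) = pvMax (g.take k)
      rw [show k - 1 + 1 = k from by omega]
    · rw [if_neg (by omega), if_neg (by omega)]
      rw [show ((k : Nat) : Int) - 1 = ((k - 1 : Nat) : Int) by omega,
        show ((k : Nat) : Int) + 1 = ((k + 1 : Nat) : Int) by omega,
        PySem.List.pyGetD_natCast, PySem.List.pyGetD_natCast,
        PySem.List.getD_map_range _ _ _ _ (by omega : k - 1 < g.length),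
        PySem.List.getD_map_range _ _ _ _ (by omega : k + 1 < g.length)]
      have ht : g.take k ≠ [] := by
        apply List.ne_nil_of_length_pos; rw [List.length_take]; omega
      have hdr : g.drop (k + 1) ≠ [] := by
        apply List.ne_nil_of_length_pos; rw [List.length_drop]; omega
      rw [pvMax_append ht hdr]
      show max (pvMax (g.take (k - 1 + 1))) (pvSm g (k + 1)) = _
      rw [show k - 1 + 1 = k from by omega]
      rfl

-- ===== VERDICT (by name: the statement is the Claim_ definition above) =====
theorem greenness_on_other_side_spec : Claim_equal_greenness_on_other_side := by
  intro g _ hpre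
  unfold Spec_greenness_on_other_side
  have hn : 2 ≤ g.length := hpre
  rw [portA_eq, portB_eq]
  have hF : (fun (acc : List Int) i =>
      if i = 0 then acc ++ [PySem.List.pyGetD (pvArrs g).2 (i + 1) 0]
      else if i = (g.length : Int) - 1 then acc ++ [PySem.List.pyGetD (pvArrs g).1 (i - 1) 0]
      else acc ++ [max (PySem.List.pyGetD (pvArrs g).1 (i - 1) 0)
                       (PySem.List.pyGetD (pvArrs g).2 (i + 1) 0)])
      = fun acc i => acc ++ [pvOutf g i] := by
    funext acc i
    unfold pvOutf
    split_ifs <;> rfl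
  rw [hF, PySem.List.foldl_append_singleton_eq_map, List.nil_append,
    PySem.List.pyRange_zero_natCast, List.map_map]
  apply List.ext_getElem
  · simp
  · intro k h1 h2
    simp only [List.length_map, List.length_range] at h1
    simp only [List.getElem_map, List.getElem_range, Function.comp_apply]
    exact pvPointwise g hn k h1
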